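-- pv_equiv track=rewrite | github.com/SanjeevHegde14/MindSpace | app.py | _soft_wrap_long_words
-- ===== SOURCE A (Python) =====
-- def _soft_wrap_long_words(text, max_word_len=40):
--     parts = text.split(" ")
--     out = []
--     for word in parts:
--         if len(word) <= max_word_len:
--             out.append(word)
--         else:
--             start = 0
--             while start < len(word):
--                 out.append(word[start:start + max_word_len])
--                 start += max_word_len
--     return " ".join(out)
-- ===== SOURCE B (Python) =====
-- def _soft_wrap_long_words(text, max_word_len=40):
--     out = []
--     run = 0
--     for c in text:
--         if c == " ":
--             out.append(c)
--             run = 0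
--         elif run + 1 > max_word_len:
--             out.append(" ")
--             out.append(c)
--             run = 1
--         else:
--             out.append(c)
--             run += 1
--     return "".join(out)
-- ===== Notes on version B (the rewrite author's own statement) =====
-- stated objective: alternative
-- what changed: Replaces split-into-words / per-word chunking while-loop / join with a single character-by-character streaming scan that maintains the current non-space run length and emits a space break whenever the run would exceed max_word_len.
-- outside the precondition, e.g. on _soft_wrap_long_words(' ', -1): A returns '', B returns ' '; on _soft_wrap_long_words('a', 0): A does not finish within the time limit, B returns ' a'
import Mathlib
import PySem

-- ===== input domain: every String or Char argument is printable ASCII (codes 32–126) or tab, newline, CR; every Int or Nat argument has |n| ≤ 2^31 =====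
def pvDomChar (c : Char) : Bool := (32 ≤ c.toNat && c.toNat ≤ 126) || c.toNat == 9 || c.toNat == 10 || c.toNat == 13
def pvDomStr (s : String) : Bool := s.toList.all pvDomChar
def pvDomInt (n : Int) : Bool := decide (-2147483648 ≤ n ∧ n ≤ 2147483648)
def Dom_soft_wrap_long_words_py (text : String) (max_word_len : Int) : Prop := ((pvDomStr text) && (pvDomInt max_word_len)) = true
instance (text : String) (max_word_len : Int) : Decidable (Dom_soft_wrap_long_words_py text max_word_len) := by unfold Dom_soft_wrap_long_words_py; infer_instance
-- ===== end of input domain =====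

-- B replaces A's split/per-word-chunking/join with a single streaming scan keeping the current
-- non-space run length (alternative decomposition, same cost).


-- ===== PORT A =====
-- A's inner while loop: 'while start < len(word): out.append(word[start:start+max]); start += max'.
-- The extra '0 ≤ start ∧ 1 ≤ m' in the guard only makes the recursion total (start begins at 0 and,
-- with m ≥ 1 from Pre_, stays ≥ 0, so the guard is equivalent to Python's 'start < len(word)' there).
def pvWrapWhile (w : List Char) (m : Int) (start : Int) (out : List (List Char)) : List (List Char) :=
  if h : 0 ≤ start ∧ 1 ≤ m ∧ start < (w.length : Int) then
    pvWrapWhile w m (start + m) (out ++ [PySem.List.slice w (some start) (some (start + m))])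
  else out
termination_by w.length - start.toNat
decreasing_by omega

def soft_wrap_long_words_py (text : String) (max_word_len : Int) : String :=
  String.mk (PySem.Chars.join [' ']
    ((PySem.Chars.splitOn text.toList [' ']).foldl (fun out word =>
      if (word.length : Int) ≤ max_word_len then out ++ [word]
      else pvWrapWhile word max_word_len 0 out) []))

-- ===== PORT B =====
def soft_wrap_long_words_py_alt (text : String) (max_word_len : Int) : String :=
  String.mk (text.toList.foldl (fun (p : List Char × Int) c =>
      if c = ' ' then (p.1 ++ [c], 0)
      else if p.2 + 1 > max_word_len then (p.1 ++ [' ', c], 1)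
      else (p.1 ++ [c], p.2 + 1)) ([], 0)).1

-- ===== PRECONDITION & SPEC =====
-- Pre_ excludes max_word_len ≤ 0: there A's while loop never advances, so A loops forever on any
-- text containing a non-space character; on the remaining all-space/empty texts with a negative
-- max_word_len A returns a value that silently drops the spaces — a degenerate artefact.
def Pre_soft_wrap_long_words_py (text : String) (max_word_len : Int) : Prop := 1 ≤ max_word_len
instance (text : String) (max_word_len : Int) : Decidable (Pre_soft_wrap_long_words_py text max_word_len) := by unfold Pre_soft_wrap_long_words_py; infer_instance

def pvWitness_soft_wrap_long_words_py : String × Int := ("ab cde", 2)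

def Spec_soft_wrap_long_words_py (text : String) (max_word_len : Int) (out : String) : Prop := out = soft_wrap_long_words_py_alt text max_word_len
instance (text : String) (max_word_len : Int) (out : String) : Decidable (Spec_soft_wrap_long_words_py text max_word_len out) := by unfold Spec_soft_wrap_long_words_py; infer_instance

-- ===== CLAIM (what is proved, stated in full; the proofs are below) =====
def Claim_equal_soft_wrap_long_words_py : Prop := ∀ (text : String) (max_word_len : Int), Dom_soft_wrap_long_words_py text max_word_len → Pre_soft_wrap_long_words_py text max_word_len → Spec_soft_wrap_long_words_py text max_word_len (soft_wrap_long_words_py text max_word_len)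

-- ===== LEMMAS AND PROOFS =====

-- Proof-only helpers: the chunk list A's word loop produces, and structural forms of B's scan.
def pvChunks (M : Nat) (w : List Char) : List (List Char) :=
  if w.length ≤ M ∨ M = 0 then [w] else w.take M :: pvChunks M (w.drop M)
termination_by w.length
decreasing_by simp_all; omega

-- B's scan restricted to a space-free word, and the run counter it ends with
def pvWrapW (m : Int) : List Char → Int → List Char
  | [], _ => []
  | c :: w, r => if r + 1 > m then ' ' :: c :: pvWrapW m w 1 else c :: pvWrapW m w (r + 1)

def pvRunEnd (m : Int) : List Char → Int → Int
  | [], r => r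
  | c :: w, r => if r + 1 > m then pvRunEnd m w 1 else pvRunEnd m w (r + 1)

-- B's whole scan, structurally
def pvBout (m : Int) : List Char → Int → List Char
  | [], _ => []
  | c :: cs, r =>
    if c = ' ' then ' ' :: pvBout m cs 0
    else if r + 1 > m then ' ' :: c :: pvBout m cs 1
    else c :: pvBout m cs (r + 1)

lemma pvB_foldl (m : Int) : ∀ (cs : List Char) (acc : List Char) (r : Int),
    (cs.foldl (fun (p : List Char × Int) c =>
      if c = ' ' then (p.1 ++ [c], 0)
      else if p.2 + 1 > m then (p.1 ++ [' ', c], 1)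
      else (p.1 ++ [c], p.2 + 1)) (acc, r)).1 = acc ++ pvBout m cs r := by
  intro cs
  induction cs with
  | nil => intro acc r; simp [pvBout]
  | cons c cs ih =>
    intro acc r
    rw [List.foldl_cons]
    by_cases hc : c = ' '
    · rw [if_pos hc, show (((acc, r).1 ++ [c], (0 : Int))) = (acc ++ [c], (0 : Int)) from rfl, ih]
      simp [pvBout, hc]
    · by_cases hr : r + 1 > m
      · rw [if_neg hc, if_pos hr,
            show (((acc, r).1 ++ [' ', c], (1 : Int))) = (acc ++ [' ', c], (1 : Int)) from rfl, ih]
        simp [pvBout, hc, hr]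
      · rw [if_neg hc, if_neg hr,
            show (((acc, r).1 ++ [c], (acc, r).2 + 1)) = (acc ++ [c], r + 1) from rfl, ih]
        simp [pvBout, hc, hr]

lemma pvBout_append (m : Int) : ∀ (w : List Char) (t : List Char) (r : Int), ' ' ∉ w →
    pvBout m (w ++ t) r = pvWrapW m w r ++ pvBout m t (pvRunEnd m w r) := by
  intro w
  induction w with
  | nil => intro t r _; simp [pvWrapW, pvRunEnd]
  | cons c w ih =>
    intro t r hw
    have hc : c ≠ ' ' := by simp at hw; exact fun h => hw.1 h.symm
    have hw' : ' ' ∉ w := by simp at hw; exact fun h => hw.2 h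
    by_cases hr : r + 1 > m <;> simp [pvBout, pvWrapW, pvRunEnd, hc, hr, ih _ _ hw']

lemma pvWrapW_short (m : Int) : ∀ (w : List Char) (r : Int), 0 ≤ r → r + w.length ≤ m →
    pvWrapW m w r = w := by
  intro w
  induction w with
  | nil => intro r _ _; simp [pvWrapW]
  | cons c w ih =>
    intro r hr hlen
    have h1 : ¬ (r + 1 > m) := by simp at hlen ⊢; omega
    simp only [pvWrapW, h1, if_false]
    rw [ih (r + 1) (by omega) (by simp at hlen ⊢; omega)]

lemma pvWrapW_long (m : Int) (hm : 1 ≤ m) : ∀ (w : List Char) (r : Int), 0 ≤ r → r ≤ m →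
    m < r + w.length →
    pvWrapW m w r = w.take (m - r).toNat ++ ' ' :: pvWrapW m (w.drop (m - r).toNat) 0 := by
  intro w
  induction w with
  | nil => intro r _ hrm hlt; simp at hlt; omega
  | cons c w ih =>
    intro r hr hrm hlt
    by_cases hre : r = m
    · have h0 : (m - r).toNat = 0 := by omega
      have hb : r + 1 > m := by omega
      have h1 : ¬ ((0 : Int) + 1 > m) := by omega
      simp only [pvWrapW, h0, List.take_zero, List.drop_zero, if_pos hb, h1, if_false,
        List.nil_append]
      norm_num
    · have hrlt : r < m := lt_of_le_of_ne hrm hre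
      have hnb : ¬ (r + 1 > m) := by omega
      have htn : (m - r).toNat = (m - (r + 1)).toNat + 1 := by omega
      simp only [pvWrapW, hnb, if_false, htn, List.take_succ_cons, List.drop_succ_cons]
      rw [ih (r + 1) (by omega) (by omega) (by simp at hlt ⊢; omega)]
      simp

lemma pvChunks_ne_nil (M : Nat) (w : List Char) : pvChunks M w ≠ [] := by
  unfold pvChunks; split <;> simp

lemma pvChunks_cons_drop (M : Nat) (hM : 1 ≤ M) (w : List Char) (hw : w ≠ []) :
    pvChunks M w = w.take M :: (if w.drop M = [] then [] else pvChunks M (w.drop M)) := by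
  rw [pvChunks]
  by_cases h : w.length ≤ M
  · simp [h, List.take_of_length_le h, List.drop_eq_nil_iff.mpr h]
  · have : ¬ (w.length ≤ M ∨ M = 0) := by omega
    have hd : ¬ (w.drop M = []) := by rw [List.drop_eq_nil_iff]; omega
    simp [this, hd]

lemma pvJoin_append : ∀ (L1 L2 : List (List Char)), L1 ≠ [] → L2 ≠ [] →
    PySem.Chars.join [' '] (L1 ++ L2) =
      PySem.Chars.join [' '] L1 ++ ' ' :: PySem.Chars.join [' '] L2 := by
  intro L1
  induction L1 with
  | nil => intro _ h; simp at h
  | cons x L1 ih =>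
    intro L2 _ hL2
    cases L1 with
    | nil =>
      cases L2 with
      | nil => simp at hL2
      | cons y t => simp [PySem.Chars.join_cons_cons, PySem.Chars.join_singleton]
    | cons x2 L1' =>
      have h1 : (x2 :: L1') ++ L2 = x2 :: (L1' ++ L2) := rfl
      calc PySem.Chars.join [' '] ((x :: x2 :: L1') ++ L2)
          = x ++ [' '] ++ PySem.Chars.join [' '] ((x2 :: L1') ++ L2) := by
            rw [List.cons_append, h1, PySem.Chars.join_cons_cons]
        _ = x ++ [' '] ++ (PySem.Chars.join [' '] (x2 :: L1') ++ ' ' :: PySem.Chars.join [' '] L2) := by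
            rw [ih L2 (by simp) hL2]
        _ = PySem.Chars.join [' '] (x :: x2 :: L1') ++ ' ' :: PySem.Chars.join [' '] L2 := by
            rw [PySem.Chars.join_cons_cons]; simp
-- join of the chunk list = B's scan of the space-free word
lemma pvJoin_chunks (m : Int) (hm : 1 ≤ m) : ∀ (w : List Char),
    PySem.Chars.join [' '] (pvChunks m.toNat w) = pvWrapW m w 0 := by
  intro w
  induction hn : w.length using Nat.strong_induction_on generalizing w with
  | _ n ih =>
  subst hn
  by_cases h : w.length ≤ m.toNat
  · rw [pvChunks]
    simp only [h, true_or, if_true, PySem.Chars.join_singleton]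
    rw [pvWrapW_short m w 0 le_rfl (by omega)]
  · have hM : 1 ≤ m.toNat := by omega
    have hw : w ≠ [] := by intro hw; subst hw; simp at h
    have hd : ¬ (w.drop m.toNat = []) := by rw [List.drop_eq_nil_iff]; omega
    rw [pvChunks_cons_drop m.toNat hM w hw]
    simp only [hd, if_false]
    obtain ⟨p, ps, hps⟩ : ∃ p ps, pvChunks m.toNat (w.drop m.toNat) = p :: ps := by
      cases hc : pvChunks m.toNat (w.drop m.toNat) with
      | nil => exact absurd hc (pvChunks_ne_nil _ _)
      | cons p ps => exact ⟨p, ps, rfl⟩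
    rw [hps, PySem.Chars.join_cons_cons, ← hps,
        ih (w.drop m.toNat).length (by rw [List.length_drop]; omega) _ rfl]
    rw [pvWrapW_long m hm w 0 le_rfl (by omega) (by omega)]
    simp

-- the while loop produces exactly the chunk list (appended to the accumulator)
lemma pvWrapWhile_eq (m : Int) (hm : 1 ≤ m) : ∀ (w : List Char) (start : Int)
    (out : List (List Char)), 0 ≤ start →
    pvWrapWhile w m start out =
      out ++ (if w.drop start.toNat = [] then [] else pvChunks m.toNat (w.drop start.toNat)) := by
  intro w start out hs
  induction hfuel : w.length - start.toNat using Nat.strong_induction_on generalizing start out with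
  | _ n ih =>
  subst hfuel
  rw [pvWrapWhile]
  by_cases h : start < (w.length : Int)
  · have hg : 0 ≤ start ∧ 1 ≤ m ∧ start < (w.length : Int) := ⟨hs, hm, h⟩
    simp only [hg, and_true, dif_pos, true_and]
    rw [ih (w.length - (start + m).toNat) (by omega) (start + m) _ (by omega) rfl]
    have hsl : PySem.List.slice w (some start) (some (start + m)) =
        (w.drop start.toNat).take m.toNat := by
      rw [PySem.List.slice_toNat w hs (by omega)]
      congr 1; omega
    have hdd : w.drop (start + m).toNat = (w.drop start.toNat).drop m.toNat := by
      rw [List.drop_drop]; congr 1; omega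
    have hne : ¬ (w.drop start.toNat = []) := by rw [List.drop_eq_nil_iff]; omega
    rw [hsl, hdd, pvChunks_cons_drop m.toNat (by omega) _ hne]
    simp [hne]
  · have hg : ¬ (0 ≤ start ∧ 1 ≤ m ∧ start < (w.length : Int)) := fun hg => h hg.2.2
    have hd : w.drop start.toNat = [] := by rw [List.drop_eq_nil_iff]; omega
    simp [hg, hd]

-- A's word loop = flatMap of the chunk lists
lemma pvA_foldl (m : Int) (hm : 1 ≤ m) : ∀ (parts : List (List Char)) (out0 : List (List Char)),
    parts.foldl (fun out word =>
      if (word.length : Int) ≤ m then out ++ [word]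
      else pvWrapWhile word m 0 out) out0 = out0 ++ parts.flatMap (pvChunks m.toNat) := by
  intro parts
  induction parts with
  | nil => intro out0; simp
  | cons word parts ih =>
    intro out0
    simp only [List.foldl_cons, List.flatMap_cons]
    by_cases h : (word.length : Int) ≤ m
    · have hc : pvChunks m.toNat word = [word] := by rw [pvChunks]; simp; omega
      rw [if_pos h, ih, hc]; simp
    · rw [if_neg h, pvWrapWhile_eq m hm word 0 out0 le_rfl]
      have hne : ¬ (word = []) := by intro hw; subst hw; simp at h; omega
      simp only [Int.toNat_zero, List.drop_zero, hne, if_false]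
      rw [ih]; simp

-- ---- splitOn characterisation (the library exports no structural lemmas for splitOn) ----
lemma pvGo_no_sep : ∀ (l : List Char) (fuel : Nat) (cur : List Char) (acc : List (List Char)),
    l.length ≤ fuel → ' ' ∉ l →
    PySem.Chars.splitOn.go [' '] fuel l cur acc = ((cur.reverse ++ l) :: acc).reverse := by
  intro l
  induction l with
  | nil =>
    intro fuel cur acc _ _
    cases fuel <;> simp [PySem.Chars.splitOn.go]
  | cons c rest ih =>
    intro fuel cur acc hf hl
    cases fuel with
    | zero => simp at hf
    | succ f =>
      have hcne : c ≠ ' ' := by simp at hl; exact fun h => hl.1 h.symm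
      have hc : ¬ ([' '].isPrefixOf (c :: rest) = true) := by
        simp [List.isPrefixOf]
        exact fun h => hcne h.symm
      simp only [PySem.Chars.splitOn.go, hc, if_false]
      rw [ih f (c :: cur) acc (by simp at hf ⊢; omega) (by simp at hl; exact hl.2)]
      simp

lemma pvGo_acc : ∀ (fuel : Nat) (l : List Char) (cur : List Char) (acc : List (List Char)),
    PySem.Chars.splitOn.go [' '] fuel l cur acc =
      acc.reverse ++ PySem.Chars.splitOn.go [' '] fuel l cur [] := by
  intro fuel
  induction fuel with
  | zero => intro l cur acc; simp [PySem.Chars.splitOn.go]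
  | succ f ih =>
    intro l cur acc
    cases l with
    | nil => simp [PySem.Chars.splitOn.go]
    | cons c rest =>
      by_cases hc : [' '].isPrefixOf (c :: rest) = true
      · simp only [PySem.Chars.splitOn.go, hc, if_true]
        rw [ih (List.drop [' '].length (c :: rest)) [] (cur.reverse :: acc),
            ih (List.drop [' '].length (c :: rest)) [] [cur.reverse]]
        simp
      · simp only [PySem.Chars.splitOn.go, hc, if_false]
        exact ih rest (c :: cur) acc

lemma pvGo_sep : ∀ (w : List Char) (rest : List Char) (fuel : Nat) (cur : List Char)
    (acc : List (List Char)), w.length + 1 ≤ fuel → ' ' ∉ w →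
    PySem.Chars.splitOn.go [' '] fuel (w ++ ' ' :: rest) cur acc =
      PySem.Chars.splitOn.go [' '] (fuel - (w.length + 1)) rest [] ((cur.reverse ++ w) :: acc) := by
  intro w
  induction w with
  | nil =>
    intro rest fuel cur acc hf _
    cases fuel with
    | zero => simp at hf
    | succ f =>
      have hc : [' '].isPrefixOf (' ' :: rest) = true := by simp [List.isPrefixOf]
      simp [PySem.Chars.splitOn.go, hc]
  | cons c w ih =>
    intro rest fuel cur acc hf hw
    cases fuel with
    | zero => simp at hf
    | succ f =>
      have hcne : c ≠ ' ' := by simp at hw; exact fun h => hw.1 h.symm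
      have hc : ¬ ([' '].isPrefixOf (c :: (w ++ ' ' :: rest)) = true) := by
        simp [List.isPrefixOf]; intro h; exact hcne h.symm
      have hstep : PySem.Chars.splitOn.go [' '] (f + 1) ((c :: w) ++ ' ' :: rest) cur acc =
          PySem.Chars.splitOn.go [' '] f (w ++ ' ' :: rest) (c :: cur) acc := by
        simp only [PySem.Chars.splitOn.go, List.cons_append]
        rw [if_neg hc]
      have hfe : f + 1 - ((c :: w).length + 1) = f - (w.length + 1) := by
        simp only [List.length_cons]; omega
      rw [hstep, hfe, ih rest f (c :: cur) acc (by simp only [List.length_cons] at hf; omega)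
            (by simp at hw; exact hw.2)]
      simp

lemma pvGo_ne_nil : ∀ (fuel : Nat) (l : List Char) (cur : List Char) (acc : List (List Char)),
    PySem.Chars.splitOn.go [' '] fuel l cur acc ≠ [] := by
  intro fuel
  induction fuel with
  | zero => intro l cur acc; simp [PySem.Chars.splitOn.go]
  | succ f ih =>
    intro l cur acc
    cases l with
    | nil => simp [PySem.Chars.splitOn.go]
    | cons c rest =>
      by_cases hc : [' '].isPrefixOf (c :: rest) = true <;>
        simp only [PySem.Chars.splitOn.go, hc, if_true, if_false] <;> apply ih

lemma pvSplit_no_sep (l : List Char) (hl : ' ' ∉ l) :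
    PySem.Chars.splitOn l [' '] = [l] := by
  unfold PySem.Chars.splitOn
  rw [pvGo_no_sep l (l.length + 1) [] [] (by omega) hl]
  simp

lemma pvSplit_sep (w rest : List Char) (hw : ' ' ∉ w) :
    PySem.Chars.splitOn (w ++ ' ' :: rest) [' '] = w :: PySem.Chars.splitOn rest [' '] := by
  unfold PySem.Chars.splitOn
  rw [pvGo_sep w rest ((w ++ ' ' :: rest).length + 1) [] [] (by simp only [List.length_append, List.length_cons]; omega) hw]
  have hfe : (w ++ ' ' :: rest).length + 1 - (w.length + 1) = rest.length + 1 := by simp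
  rw [hfe, pvGo_acc]
  simp

lemma pvSplit_ne_nil (l : List Char) : PySem.Chars.splitOn l [' '] ≠ [] :=
  pvGo_ne_nil (l.length + 1) l [] []

-- ---- the main equivalence on char lists ----
lemma pvMain (m : Int) (hm : 1 ≤ m) : ∀ (cs : List Char),
    PySem.Chars.join [' '] ((PySem.Chars.splitOn cs [' ']).flatMap (pvChunks m.toNat)) =
      pvBout m cs 0 := by
  intro cs
  induction hn : cs.length using Nat.strong_induction_on generalizing cs with
  | _ n ih =>
  subst hn
  by_cases hmem : ' ' ∈ cs
  · obtain ⟨w, rest, hcs, hw⟩ := List.eq_append_cons_of_mem hmem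
    subst hcs
    rw [pvSplit_sep w rest hw]
    simp only [List.flatMap_cons]
    have hne2 : (PySem.Chars.splitOn rest [' ']).flatMap (pvChunks m.toNat) ≠ [] := by
      obtain ⟨p, ps, hps⟩ : ∃ p ps, PySem.Chars.splitOn rest [' '] = p :: ps := by
        cases hc : PySem.Chars.splitOn rest [' '] with
        | nil => exact absurd hc (pvSplit_ne_nil rest)
        | cons p ps => exact ⟨p, ps, rfl⟩
      rw [hps, List.flatMap_cons]
      cases hcp : pvChunks m.toNat p with
      | nil => exact absurd hcp (pvChunks_ne_nil _ _)
      | cons q qs => simp [hcp]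
    rw [pvJoin_append _ _ (pvChunks_ne_nil _ _) hne2,
        pvJoin_chunks m hm w, ih rest.length (by simp; omega) rest rfl,
        pvBout_append m w (' ' :: rest) 0 hw]
    simp [pvBout]
  · rw [pvSplit_no_sep cs hmem]
    simp only [List.flatMap_cons, List.flatMap_nil, List.append_nil]
    rw [pvJoin_chunks m hm cs]
    have := pvBout_append m cs [] 0 hmem
    simpa [pvBout] using this.symm

-- ===== VERDICT (by name: the statement is the Claim_ definition above) =====
theorem soft_wrap_long_words_py_spec : Claim_equal_soft_wrap_long_words_py := by
  intro text m _ hpre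
  unfold Spec_soft_wrap_long_words_py soft_wrap_long_words_py soft_wrap_long_words_py_alt
  have hm : 1 ≤ m := hpre
  rw [pvA_foldl m hm _ [], pvB_foldl m text.toList [] 0]
  rw [List.nil_append, pvMain m hm text.toList]
  simp
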